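-- pv_equiv track=rewrite | github.com/gary60182007/diu9u-obfuscator | rebuild_source.py | clean_stmts
-- ===== SOURCE A (Python) =====
-- def clean_stmts(stmts):
--     result = []
--     for s in stmts:
--         if not s or not s.strip():
--             continue
--         s = s.strip()
--         if s.startswith('-- dispatch') or s.startswith('-- closure upval'):
--             continue
--         if s == 'close upvals':
--             continue
--         result.append(s)
--
--     final = []
--     i = 0
--     while i < len(result):
--         line = result[i]
--         if line.startswith('if ') and line.endswith(' then'):
--             if i + 1 < len(result) and result[i+1] == 'end':
--                 i += 2
--                 continue
--         final.append(line)
--         i += 1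
--
--     return final
-- ===== SOURCE B (Python) =====
-- def clean_stmts(stmts):
--     final = []
--     pending = None  # an unflushed 'if ... then' line
--     for s in stmts:
--         if not s or not s.strip():
--             continue
--         t = s.strip()
--         if t.startswith('-- dispatch') or t.startswith('-- closure upval'):
--             continue
--         if t == 'close upvals':
--             continue
--         if pending is not None:
--             if t == 'end':
--                 pending = None
--                 continue
--             final.append(pending)
--             pending = None
--         if t.startswith('if ') and t.endswith(' then'):
--             pending = t
--         else:
--             final.append(t)
--     if pending is not None:
--         final.append(pending)
--     return final
-- ===== Notes on version B (the rewrite author's own statement) =====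
-- stated objective: simpler
-- what changed: Replaced A's two passes (build a filtered list, then an index+2 while-loop that looks ahead one element to drop adjacent 'if...then'/'end' pairs) with a single fused pass over stmts maintaining one 'pending' unflushed if-then line.
import Mathlib
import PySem

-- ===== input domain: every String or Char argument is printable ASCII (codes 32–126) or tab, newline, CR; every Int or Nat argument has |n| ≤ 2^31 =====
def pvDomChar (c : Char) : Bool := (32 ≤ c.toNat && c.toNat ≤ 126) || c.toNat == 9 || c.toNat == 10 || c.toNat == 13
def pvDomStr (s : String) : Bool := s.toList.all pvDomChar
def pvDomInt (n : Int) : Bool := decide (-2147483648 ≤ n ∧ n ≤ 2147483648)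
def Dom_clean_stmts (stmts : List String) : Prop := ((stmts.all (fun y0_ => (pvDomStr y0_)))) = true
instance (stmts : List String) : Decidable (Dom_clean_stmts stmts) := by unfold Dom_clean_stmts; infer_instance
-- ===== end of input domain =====

-- B replaces A's two passes (filter into a list, then an index+2 while-loop pairing each
-- 'if … then' with an adjacent 'end') by ONE pass holding a single 'pending' if-line (objective: simpler).

-- ===== PORT A =====
-- first loop of A: filter/strip, appending to 'result'
def pvAFold (acc : List String) (s : String) : List String :=
  if s = "" ∨ PySem.Str.strip s = "" then acc
  else
    let t := PySem.Str.strip s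
    if PySem.Str.startswith t "-- dispatch" || PySem.Str.startswith t "-- closure upval" then acc
    else if t = "close upvals" then acc
    else acc ++ [t]

-- second loop of A: while over index i, with the i+1 lookahead, consuming the list
def pvAWhile : List String → List String
  | [] => []
  | [line] => [line]
  | line :: next :: rest =>
    if PySem.Str.startswith line "if " && PySem.Str.endswith line " then" then
      if next = "end" then pvAWhile rest else line :: pvAWhile (next :: rest)
    else line :: pvAWhile (next :: rest)

def clean_stmts (stmts : List String) : List String :=
  pvAWhile (stmts.foldl pvAFold [])

-- ===== PORT B =====
-- single pass; 'pending' holds an unflushed 'if … then' line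
def pvBGo (pending : Option String) : List String → List String
  | [] => match pending with | some p => [p] | none => []
  | s :: rest =>
    if s = "" ∨ PySem.Str.strip s = "" then pvBGo pending rest
    else
      let t := PySem.Str.strip s
      if PySem.Str.startswith t "-- dispatch" || PySem.Str.startswith t "-- closure upval" then pvBGo pending rest
      else if t = "close upvals" then pvBGo pending rest
      else
        match pending with
        | some p =>
          if t = "end" then pvBGo none rest
          else p :: (if PySem.Str.startswith t "if " && PySem.Str.endswith t " then"
                     then pvBGo (some t) rest else t :: pvBGo none rest)
        | none =>
          if PySem.Str.startswith t "if " && PySem.Str.endswith t " then"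
          then pvBGo (some t) rest else t :: pvBGo none rest

def clean_stmts_alt (stmts : List String) : List String := pvBGo none stmts

-- ===== PRECONDITION & SPEC =====
def Spec_clean_stmts (stmts : List String) (out : List String) : Prop := out = clean_stmts_alt stmts
instance (stmts : List String) (out : List String) : Decidable (Spec_clean_stmts stmts out) := by unfold Spec_clean_stmts; infer_instance

-- ===== CLAIM (what is proved, stated in full; the proofs are below) =====
def Claim_equal_clean_stmts : Prop := ∀ (stmts : List String), Dom_clean_stmts stmts → Spec_clean_stmts stmts (clean_stmts stmts)

-- ===== LEMMAS AND PROOFS =====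

-- recursive form of A's first loop
def pvFilt : List String → List String
  | [] => []
  | s :: rest =>
    if s = "" ∨ PySem.Str.strip s = "" then pvFilt rest
    else
      let t := PySem.Str.strip s
      if PySem.Str.startswith t "-- dispatch" || PySem.Str.startswith t "-- closure upval" then pvFilt rest
      else if t = "close upvals" then pvFilt rest
      else t :: pvFilt rest

theorem pvFold_eq (stmts : List String) (acc : List String) :
    stmts.foldl pvAFold acc = acc ++ pvFilt stmts := by
  induction stmts generalizing acc with
  | nil => simp [pvFilt]
  | cons s rest ih =>
    simp only [List.foldl, pvFilt, pvAFold]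
    split_ifs with h1 h2 h3 <;> simp [ih]

-- step lemmas for A's lookahead pass
theorem pvAWhile_not_if (a : String) (l : List String)
    (h : ¬ (PySem.Str.startswith a "if " && PySem.Str.endswith a " then") = true) :
    pvAWhile (a :: l) = a :: pvAWhile l := by
  cases l with
  | nil => simp [pvAWhile]
  | cons b l => simp only [pvAWhile]; rw [if_neg h]

theorem pvAWhile_if_end (a : String) (l : List String)
    (h : (PySem.Str.startswith a "if " && PySem.Str.endswith a " then") = true) :
    pvAWhile (a :: "end" :: l) = pvAWhile l := by
  simp only [pvAWhile]; rw [if_pos h]; simp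

theorem pvAWhile_if_cons (a b : String) (l : List String)
    (h : (PySem.Str.startswith a "if " && PySem.Str.endswith a " then") = true)
    (hb : b ≠ "end") :
    pvAWhile (a :: b :: l) = a :: pvAWhile (b :: l) := by
  simp only [pvAWhile]; rw [if_pos h, if_neg hb]

-- the fused pending machine agrees with A's lookahead pass on the filtered list
theorem pvGo_eq (l : List String) :
    pvBGo none l = pvAWhile (pvFilt l) ∧
    ∀ p, (PySem.Str.startswith p "if " && PySem.Str.endswith p " then") = true →
      pvBGo (some p) l = pvAWhile (p :: pvFilt l) := by
  induction l with
  | nil =>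
    refine ⟨by simp [pvBGo, pvFilt, pvAWhile], fun p hp => ?_⟩
    simp [pvBGo, pvFilt, pvAWhile]
  | cons x rest ih =>
    constructor
    · show pvBGo none (x :: rest) = pvAWhile (pvFilt (x :: rest))
      simp only [pvBGo, pvFilt]
      split_ifs with h1 h2 h3 hx
      · exact ih.1
      · exact ih.1
      · exact ih.1
      · exact ih.2 _ hx
      · rw [pvAWhile_not_if _ _ hx, ih.1]
    · intro p hp
      show pvBGo (some p) (x :: rest) = pvAWhile (p :: pvFilt (x :: rest))
      simp only [pvBGo, pvFilt]
      split_ifs with h1 h2 h3 he hx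
      · exact ih.2 p hp
      · exact ih.2 p hp
      · exact ih.2 p hp
      · rw [he, pvAWhile_if_end _ _ hp]; exact ih.1
      · rw [pvAWhile_if_cons _ _ _ hp he, ih.2 _ hx]
      · rw [pvAWhile_if_cons _ _ _ hp he, pvAWhile_not_if _ _ hx, ih.1]

-- ===== VERDICT (by name: the statement is the Claim_ definition above) =====
theorem clean_stmts_spec : Claim_equal_clean_stmts := by
  intro stmts _
  show clean_stmts stmts = clean_stmts_alt stmts
  simp [clean_stmts, clean_stmts_alt, pvFold_eq, (pvGo_eq stmts).1]
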